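-- pv_equiv track=rewrite | github.com/SiegAndy/Moodle-Downloader | src/utils/func.py | parse_file_format
-- ===== SOURCE A (Python) =====
-- def parse_file_format(value: str) -> str:
--     format_flag = [
--         "file_index",
--         "section_index",
--         "section_file_index",
--         "section_title",
--         "url_filename",
--         "url_file_extension",
--     ]
--     segments = value.split("%")
--     segments_len = len(segments)
--     result = ""
--     for index, segment in enumerate(segments):
--         if index % 2 == 0 or segments_len - 1 == index:
--             result += segment
--         else:
--             if segment not in format_flag:
--                 raise ValueError(
--                     f"Error! Unkown Format Flag '{segment}'. Valid Flags are {str(format_flag)}."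
--                 )
--             result += "{" + segment + "}"
--     return result
-- ===== SOURCE B (Python) =====
-- def parse_file_format(value: str) -> str:
--     format_flag = [
--         "file_index",
--         "section_index",
--         "section_file_index",
--         "section_title",
--         "url_filename",
--         "url_file_extension",
--     ]
--     out = []
--     s = value
--     while True:
--         lit, sep, s = s.partition("%")
--         out.append(lit)
--         if not sep:
--             break
--         flag, sep2, s = s.partition("%")
--         if not sep2:
--             out.append(flag)
--             break
--         if flag not in format_flag:
--             raise ValueError(
--                 f"Error! Unkown Format Flag '{flag}'. Valid Flags are {str(format_flag)}."
--             )
--         out.append("{" + flag + "}")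
--     return "".join(out)
-- ===== Notes on version B (the rewrite author's own statement) =====
-- stated objective: alternative
-- what changed: Replaced A's split-on-percent plus index-parity/last-segment bookkeeping with a single left-to-right scan that consumes one literal-then-flag chunk per iteration via str.partition, validating each flag as it is consumed.
import Mathlib
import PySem

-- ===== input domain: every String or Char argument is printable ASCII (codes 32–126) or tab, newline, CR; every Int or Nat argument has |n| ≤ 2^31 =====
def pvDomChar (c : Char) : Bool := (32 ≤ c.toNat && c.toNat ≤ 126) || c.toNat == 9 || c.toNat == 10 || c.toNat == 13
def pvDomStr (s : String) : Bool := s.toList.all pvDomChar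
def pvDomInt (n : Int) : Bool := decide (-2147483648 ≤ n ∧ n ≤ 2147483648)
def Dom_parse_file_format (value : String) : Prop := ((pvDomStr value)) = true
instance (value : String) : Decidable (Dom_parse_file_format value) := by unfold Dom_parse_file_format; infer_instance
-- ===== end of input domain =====

-- B replaces A's split-on-'%'/index-parity loop by a single left-to-right scan that
-- consumes one "literal, %flag%" chunk per step (str.partition twice); objective: simpler.

-- ===== PORT A =====
def pffFlags : List (List Char) :=
  ["file_index".toList, "section_index".toList, "section_file_index".toList,
   "section_title".toList, "url_filename".toList, "url_file_extension".toList]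

-- the for-loop over enumerate(segments): index i, remaining segments, accumulated result
-- (Option = the ValueError path: none where Python raises)
def pffLoopA (n : Nat) : Nat → List (List Char) → Option (List Char) → Option (List Char)
  | _, [], acc => acc
  | i, seg :: rest, acc =>
      pffLoopA n (i + 1) rest (acc.bind fun res =>
        if i % 2 == 0 || n - 1 == i then some (res ++ seg)
        else if pffFlags.contains seg then some (res ++ '{' :: (seg ++ ['}'])) else none)

def parse_file_format (value : String) : String :=
  let segments := PySem.Chars.splitOn value.toList ['%']
  String.ofList ((pffLoopA segments.length 0 segments (some [])).getD [])

-- ===== PORT B =====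
-- B's while-loop: lit, sep, s = s.partition("%") is takeWhile/dropWhile on the char list
def pffAltGo : List Char → Option (List Char)
  | s =>
    let lit := s.takeWhile (· ≠ '%')
    match h1 : s.dropWhile (· ≠ '%') with
    | [] => some lit
    | _ :: s1 =>
      let flag := s1.takeWhile (· ≠ '%')
      match h2 : s1.dropWhile (· ≠ '%') with
      | [] => some (lit ++ flag)
      | _ :: s2 =>
        if pffFlags.contains flag then
          (pffAltGo s2).map (fun t => lit ++ '{' :: (flag ++ '}' :: t))
        else none
termination_by s => s.length
decreasing_by
  have hA : (s.dropWhile (· ≠ '%')).length ≤ s.length := s.length_dropWhile_le _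
  have hB : (s1.dropWhile (· ≠ '%')).length ≤ s1.length := s1.length_dropWhile_le _
  rw [h1] at hA; rw [h2] at hB
  simp at hA hB
  exact Nat.lt_trans hB hA

def parse_file_format_alt (value : String) : String :=
  String.ofList ((pffAltGo value.toList).getD [])

-- ===== PRECONDITION & SPEC =====
-- Pre_ excludes exactly the inputs on which A raises ValueError: a '%flag%' pair whose
-- flag is not one of the six format flags (every odd-index, non-final '%'-segment must be a valid flag).
def pffOk : List (List Char) → Bool
  | [] => true
  | [_] => true
  | _ :: flag :: rest => (rest.isEmpty || pffFlags.contains flag) && pffOk rest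

def Pre_parse_file_format (value : String) : Prop :=
  pffOk (PySem.Chars.splitOn value.toList ['%']) = true
instance (value : String) : Decidable (Pre_parse_file_format value) := by
  unfold Pre_parse_file_format; infer_instance

def pvWitness_parse_file_format : String := "a%file_index%-b%"

def Spec_parse_file_format (value : String) (out : String) : Prop := out = parse_file_format_alt value
instance (value : String) (out : String) : Decidable (Spec_parse_file_format value out) := by unfold Spec_parse_file_format; infer_instance

-- ===== CLAIM (what is proved, stated in full; the proofs are below) =====
def Claim_equal_parse_file_format : Prop := ∀ (value : String), Dom_parse_file_format value → Pre_parse_file_format value → Spec_parse_file_format value (parse_file_format value)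

-- ===== LEMMAS AND PROOFS =====

-- the natural structural recursion computing split('%')
def pffSplit : List Char → List (List Char)
  | [] => [[]]
  | c :: r => if c = '%' then [] :: pffSplit r else (pffSplit r).modifyHead (c :: ·)

theorem pffSplit_ne_nil : ∀ cs : List Char, pffSplit cs ≠ []
  | [] => by simp [pffSplit]
  | c :: r => by
    simp only [pffSplit]
    split
    · simp
    · cases h : pffSplit r with
      | nil => exact absurd h (pffSplit_ne_nil r)
      | cons a b => simp [List.modifyHead]

theorem pffGo_eq (fuel : Nat) : ∀ (l cur : List Char) (acc : List (List Char)),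
    l.length < fuel →
    PySem.Chars.splitOn.go ['%'] fuel l cur acc
      = acc.reverse ++ (pffSplit l).modifyHead (cur.reverse ++ ·) := by
  induction fuel with
  | zero => intro l cur acc h; omega
  | succ f ih =>
    intro l cur acc h
    cases l with
    | nil => simp [PySem.Chars.splitOn.go, pffSplit, List.modifyHead]
    | cons c rest =>
      simp only [PySem.Chars.splitOn.go]
      by_cases hc : c = '%'
      · subst hc
        have hp : List.isPrefixOf ['%'] ('%' :: rest) = true := by
          simp [List.isPrefixOf]
        simp only [hp, if_pos]
        rw [ih _ _ _ (by simpa using Nat.lt_of_succ_lt_succ h)]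
        cases hs : pffSplit rest with
        | nil => exact absurd hs (pffSplit_ne_nil rest)
        | cons a b =>
          simp [pffSplit, hs, List.modifyHead]
      · have hp : List.isPrefixOf ['%'] (c :: rest) = false := by
          simp [List.isPrefixOf]
          exact fun hcc => absurd hcc.symm hc
        simp only [hp, if_neg, Bool.false_eq_true, not_false_iff]
        rw [ih _ _ _ (by simpa using Nat.lt_of_succ_lt_succ h)]
        cases hs : pffSplit rest with
        | nil => exact absurd hs (pffSplit_ne_nil rest)
        | cons a b =>
          simp [pffSplit, hc, hs, List.modifyHead]
theorem pffSplitOn_eq (cs : List Char) :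
    PySem.Chars.splitOn cs ['%'] = pffSplit cs := by
  unfold PySem.Chars.splitOn
  rw [pffGo_eq (cs.length + 1) cs [] [] (Nat.lt_succ_self _)]
  cases hs : pffSplit cs with
  | nil => exact absurd hs (pffSplit_ne_nil cs)
  | cons a b => simp [List.modifyHead]

-- B's chunk recursion, reformulated over the segment list (two segments per step)
def pffSegs : List (List Char) → Option (List Char)
  | [] => some []
  | [lit] => some lit
  | lit :: flag :: rest =>
    if rest = [] then some (lit ++ flag)
    else if pffFlags.contains flag then
      (pffSegs rest).map (fun t => lit ++ '{' :: (flag ++ '}' :: t))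
    else none

theorem pffSplit_scan_nil : ∀ cs : List Char,
    cs.dropWhile (· ≠ '%') = [] → pffSplit cs = [cs.takeWhile (· ≠ '%')] := by
  intro cs
  induction cs with
  | nil => intro _; simp [pffSplit]
  | cons c r ih =>
    intro h
    by_cases hc : c = '%'
    · subst hc; simp at h
    · rw [List.dropWhile_cons] at h
      simp [hc] at h
      have h' : List.dropWhile (fun x => decide (x ≠ '%')) r = [] := by simpa using h
      simp [pffSplit, hc, ih h', List.modifyHead]

theorem pffSplit_scan_cons : ∀ (cs : List Char) (c0 : Char) (r : List Char),
    cs.dropWhile (· ≠ '%') = c0 :: r →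
    pffSplit cs = cs.takeWhile (· ≠ '%') :: pffSplit r := by
  intro cs
  induction cs with
  | nil => intro c0 r h; simp at h
  | cons c t ih =>
    intro c0 r h
    by_cases hc : c = '%'
    · subst hc
      simp at h
      simp [pffSplit, h.2]
    · rw [List.dropWhile_cons] at h
      simp [hc] at h
      have h' : List.dropWhile (fun x => decide (x ≠ '%')) t = c0 :: r := by simpa using h
      simp [pffSplit, hc, ih c0 r h', List.modifyHead]

theorem pffAltGo_eq (cs : List Char) : pffAltGo cs = pffSegs (pffSplit cs) := by
  induction cs using pffAltGo.induct with
  | case1 x s h1 =>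
    have h1' : List.dropWhile (fun x => decide (x ≠ '%')) x = [] := h1
    rw [pffSplit_scan_nil x h1', pffAltGo.eq_def]
    dsimp only
    split
    · rfl
    · rename_i c1 s1 heq; rw [h1'] at heq; cases heq
  | case2 x s c1 s1 h1 h2 =>
    have h1' : List.dropWhile (fun x => decide (x ≠ '%')) x = c1 :: s1 := h1
    have h2' : List.dropWhile (fun x => decide (x ≠ '%')) s1 = [] := h2
    rw [pffSplit_scan_cons x c1 s1 h1', pffSplit_scan_nil s1 h2', pffAltGo.eq_def]
    dsimp only
    split
    · rename_i heq; rw [h1'] at heq; cases heq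
    · rename_i c1' s1' heq
      rw [h1'] at heq; injection heq with e1 e2; subst e1; subst e2
      split
      · rfl
      · rename_i c2' s2' heq2; rw [h2'] at heq2; cases heq2
  | case3 x s c1 s1 h1 flag c2 s2 h2 hflag ih =>
    have h1' : List.dropWhile (fun x => decide (x ≠ '%')) x = c1 :: s1 := h1
    have h2' : List.dropWhile (fun x => decide (x ≠ '%')) s1 = c2 :: s2 := h2
    have hflag' : pffFlags.contains (List.takeWhile (fun x => decide (x ≠ '%')) s1) = true := hflag
    rw [pffSplit_scan_cons x c1 s1 h1', pffSplit_scan_cons s1 c2 s2 h2', pffAltGo.eq_def]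
    dsimp only
    split
    · rename_i heq; rw [h1'] at heq; cases heq
    · rename_i c1' s1' heq
      rw [h1'] at heq; injection heq with e1 e2; subst e1; subst e2
      split
      · rename_i heq2; rw [h2'] at heq2; cases heq2
      · rename_i c2' s2' heq2
        rw [h2'] at heq2; injection heq2 with f1 f2; subst f1; subst f2
        rw [if_pos hflag', ih]
        have hne := pffSplit_ne_nil s2
        have hm : List.takeWhile (fun x => !decide (x = '%')) s1 ∈ pffFlags := by
          simpa using hflag'
        simp [pffSegs, hne, hm]
  | case4 x s c1 s1 h1 flag c2 s2 h2 hflag =>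
    have h1' : List.dropWhile (fun x => decide (x ≠ '%')) x = c1 :: s1 := h1
    have h2' : List.dropWhile (fun x => decide (x ≠ '%')) s1 = c2 :: s2 := h2
    have hflag' : ¬ pffFlags.contains (List.takeWhile (fun x => decide (x ≠ '%')) s1) = true := hflag
    rw [pffSplit_scan_cons x c1 s1 h1', pffSplit_scan_cons s1 c2 s2 h2', pffAltGo.eq_def]
    dsimp only
    split
    · rename_i heq; rw [h1'] at heq; cases heq
    · rename_i c1' s1' heq
      rw [h1'] at heq; injection heq with e1 e2; subst e1; subst e2
      split
      · rename_i heq2; rw [h2'] at heq2; cases heq2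
      · rename_i c2' s2' heq2
        rw [h2'] at heq2; injection heq2 with f1 f2; subst f1; subst f2
        rw [if_neg hflag']
        have hne := pffSplit_ne_nil s2
        have hm : List.takeWhile (fun x => !decide (x = '%')) s1 ∉ pffFlags := by
          simpa using hflag'
        simp [pffSegs, hne, hm]

theorem pffLoopA_spec : ∀ (segs : List (List Char)) (n i : Nat) (res : List Char),
    n = i + segs.length → i % 2 = 0 → pffOk segs = true →
    pffLoopA n i segs (some res) = (pffSegs segs).map (res ++ ·) := by
  intro segs
  induction segs using pffSegs.induct with
  | case1 =>
    intro n i res hn hi hok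
    simp [pffLoopA, pffSegs]
  | case2 lit =>
    intro n i res hn hi hok
    have hc : (i % 2 == 0 || n - 1 == i) = true := by simp [hi]
    simp [pffLoopA, hc, pffSegs]
  | case3 lit flag =>
    -- the [lit, flag] case: flag is the final segment, appended raw
    intro n i res hn hi hok
    have hc1 : (i % 2 == 0 || n - 1 == i) = true := by simp [hi]
    have hc2 : ((i + 1) % 2 == 0 || n - 1 == i + 1) = true := by
      simp at hn ⊢; omega
    simp [pffLoopA, hc1, hc2, pffSegs]
  | case4 lit flag rest hrest hflag ih =>
    intro n i res hn hi hok
    have hre : rest.isEmpty = false := by simp [hrest]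
    simp only [pffOk, hre, Bool.false_or, Bool.and_eq_true] at hok
    have hc1 : (i % 2 == 0 || n - 1 == i) = true := by simp [hi]
    have hc2 : ((i + 1) % 2 == 0 || n - 1 == i + 1) = false := by
      have hlen : 0 < rest.length := List.length_pos_iff.mpr hrest
      simp at hn ⊢
      omega
    simp only [pffLoopA, Option.bind_some, hc1, if_pos, hc2, Bool.false_eq_true, if_neg,
      not_false_iff, hok.1, if_pos]
    rw [ih n (i + 2) (res ++ lit ++ '{' :: (flag ++ ['}'])) (by simp at hn ⊢; omega) (by omega) hok.2]
    have hne : rest ≠ [] := hrest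
    have hm : flag ∈ pffFlags := by simpa using hok.1
    cases hps : pffSegs rest with
    | none => simp [pffSegs, hne, hm, hps]
    | some t => simp [pffSegs, hne, hm, hps]
  | case5 lit flag rest hrest hflag =>
    intro n i res hn hi hok
    have hre : rest.isEmpty = false := by simp [hrest]
    simp [pffOk, hre] at hok
    exact absurd (by simpa using hok.1 : pffFlags.contains flag = true) hflag

-- ===== VERDICT (by name: the statement is the Claim_ definition above) =====
theorem parse_file_format_spec : Claim_equal_parse_file_format := by
  intro value _ hpre
  unfold Pre_parse_file_format at hpre
  rw [pffSplitOn_eq] at hpre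
  unfold Spec_parse_file_format parse_file_format parse_file_format_alt
  simp only [pffSplitOn_eq, pffAltGo_eq]
  rw [pffLoopA_spec (pffSplit value.toList) (pffSplit value.toList).length 0 []
    (by omega) rfl hpre]
  cases pffSegs (pffSplit value.toList) <;> simp
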